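-- pv_equiv track=rewrite | github.com/hwangchahae/python-codingtest | 프로그래머스/프로그래머스Lv0-코드처리하기.py | solution
-- ===== SOURCE A (Python) =====
-- def solution(code):
--
--     mode = 0
--     ret=[]
--
--     for i, c in enumerate(code):     #range(len(code)) -> enumerate(code)사용 : 인덱스, 값 을 동시에 가져옴.
--         if c == "1":                 # c==1 mode값을 0, 1로 번갈아가며 변경해줌
--             mode = 1 - mode
--
--         elif (i % 2 == mode):        # mode가 0이면 짝수 인덱스 문자 추가
--                 ret.append(c)        # mode가 1이면 홀수 인덱스 문자 추가
--
--     return "".join(ret) if ret else "EMPTY"    #ret이 비어있지않다면 ret을 join해서 문자열로 반환!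
-- ===== SOURCE B (Python) =====
-- def solution(code):
--     # prefix table: parity[i] = number of '1' characters in code[:i], mod 2
--     parity = []
--     p = 0
--     for c in code:
--         parity.append(p)
--         if c == '1':
--             p = 1 - p
--     ret = [c for (i, c), p in zip(enumerate(code), parity) if c != '1' and i % 2 == p]
--     return ''.join(ret) if ret else 'EMPTY'
-- ===== Notes on version B (the rewrite author's own statement) =====
-- stated objective: alternative
-- what changed: Replaces A's single stateful loop (mode toggled inline while appending) with a two-phase structure: first a precomputed prefix-parity table of '1'-counts, then a stateless filtering comprehension over zip(enumerate(code), parity).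
import Mathlib
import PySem

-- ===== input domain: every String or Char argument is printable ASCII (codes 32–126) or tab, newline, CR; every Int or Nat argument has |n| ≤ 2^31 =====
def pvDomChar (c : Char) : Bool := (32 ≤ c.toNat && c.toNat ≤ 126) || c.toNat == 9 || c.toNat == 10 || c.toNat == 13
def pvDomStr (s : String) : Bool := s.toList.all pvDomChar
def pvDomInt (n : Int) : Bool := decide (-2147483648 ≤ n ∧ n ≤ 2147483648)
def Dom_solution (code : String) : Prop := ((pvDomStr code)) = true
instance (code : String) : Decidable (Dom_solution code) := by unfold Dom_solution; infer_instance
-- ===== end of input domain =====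

-- B replaces A's single mode-toggling loop with a precomputed prefix-parity table plus a stateless filtering pass (alternative decomposition, same cost).


-- ===== PORT A =====
-- A: one pass, toggling `mode` on '1' and appending chars whose index parity equals mode.
def solution (code : String) : String :=
  let st := (PySem.List.enumerate code.toList).foldl
    (fun (st : Int × List Char) ic =>
      if ic.2 = '1' then (1 - st.1, st.2)
      else if ic.1 % 2 = st.1 then (st.1, st.2 ++ [ic.2])
      else st)
    (0, [])
  if st.2 = [] then "EMPTY" else String.mk st.2

-- ===== PORT B =====
-- prefix-parity table: entry i is the count of '1' in code[:i] mod 2 (as in Source B's first loop)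
def buildParity : List Char → Int → List Int
  | [], _ => []
  | c :: cs, p => p :: buildParity cs (if c = '1' then 1 - p else p)

def solution_alt (code : String) : String :=
  let parity := buildParity code.toList 0
  let ret := (((PySem.List.enumerate code.toList).zip parity).filter
      (fun x => x.1.2 != '1' && x.1.1 % 2 == x.2)).map (fun x => x.1.2)
  if ret = [] then "EMPTY" else String.mk ret

-- ===== PRECONDITION & SPEC =====
def Spec_solution (code : String) (out : String) : Prop := out = solution_alt code
instance (code : String) (out : String) : Decidable (Spec_solution code out) := by unfold Spec_solution; infer_instance

-- ===== CLAIM (what is proved, stated in full; the proofs are below) =====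
def Claim_equal_solution : Prop := ∀ (code : String), Dom_solution code → Spec_solution code (solution code)

-- ===== LEMMAS AND PROOFS =====

-- common recursive characterisation of the list of kept characters
def retRec : List Char → Int → Int → List Char
  | [], _, _ => []
  | c :: cs, i, p =>
    if c = '1' then retRec cs (i + 1) (1 - p)
    else if i % 2 = p then c :: retRec cs (i + 1) p
    else retRec cs (i + 1) p

theorem foldA_eq (cs : List Char) : ∀ (i p : Int) (acc : List Char),
    ((PySem.List.enumerate cs i).foldl
      (fun (st : Int × List Char) ic =>
        if ic.2 = '1' then (1 - st.1, st.2)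
        else if ic.1 % 2 = st.1 then (st.1, st.2 ++ [ic.2])
        else st) (p, acc)).2 = acc ++ retRec cs i p := by
  induction cs with
  | nil => intro i p acc; simp [PySem.List.enumerate_nil, retRec]
  | cons c cs ih =>
    intro i p acc
    rw [PySem.List.enumerate_cons]
    simp only [List.foldl_cons]
    by_cases h1 : c = '1'
    · simp [h1, retRec, ih]
    · by_cases h2 : i % 2 = p
      · simp [h1, h2, retRec, ih]
      · simp [h1, h2, retRec, ih]

theorem zipB_eq (cs : List Char) : ∀ (i p : Int),
    (((PySem.List.enumerate cs i).zip (buildParity cs p)).filter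
        (fun x => x.1.2 != '1' && x.1.1 % 2 == x.2)).map (fun x => x.1.2)
      = retRec cs i p := by
  induction cs with
  | nil => intro i p; simp [PySem.List.enumerate_nil, buildParity, retRec]
  | cons c cs ih =>
    intro i p
    rw [PySem.List.enumerate_cons]
    by_cases h1 : c = '1'
    · simp [buildParity, h1, retRec, ih]
    · by_cases h2 : i % 2 = p
      · simp [buildParity, h1, h2, retRec, ih]
      · simp [buildParity, h1, h2, retRec, ih]

-- ===== VERDICT (by name: the statement is the Claim_ definition above) =====
theorem solution_spec : Claim_equal_solution := by
  intro code _
  unfold Spec_solution solution solution_alt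
  simp only [foldA_eq, zipB_eq, List.nil_append]
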